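/- GENERATED by mk_final_copies.py from the proof of the farm's unit `stb_vorbis_get_frame_float.5` (farm:stb_vorbis_get_frame_float.5.1: Proof.lean) as the
   re-elaboration sweep compiled it — do not edit. -/
import Asan.CheckWalk
import Vorbis.Spec.Units.stb_vorbis_get_frame_float_5
import Vorbis.Spec.Worked.stb_vorbis_get_frame_float_5_Lemmas

/- SEGMENT 5 OF stb_vorbis_get_frame_float (119806H … 119870H; stb_vorbis_fixed.c 5069–5074: `f->channel_buffer_start = left;
   f->channel_buffer_end = left + len; if (channels) *channels = f->channels; if (output) *output = f->outputs; return len;`).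
   ONE walk from the loop's exit (`AtStores`) to the epilogue's head (`AtEpi`): four paths (each out-pointer NULL or not), four
   check sites. The exit assertion is built by ONE lemma, `seg5_exit` (Lemmas.lean), from the footprint of the path's stores. -/
open X86 X86.User Asan Vorbis Vorbis.Spec

set_option maxRecDepth 4000
set_option maxHeartbeats 4000000

/-- **Segment 5**: from the loop's exit (`AtStores`) to the epilogue's head (`AtEpi`) with the result `r`. -/
theorem Vorbis.Spec.Worked.stb_vorbis_get_frame_float_5_ok : Vorbis.Spec.stb_vorbis_get_frame_float_5.Statement := by
  intro Lay hLay μ hμ u₀ hcode hstore4 hstore8 others frames len A stored room ysz u ret f left r ch v hat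
  -- 1. the entry state's facts, from the assertion
  have hat0 := hat
  have he := hat.body.frame.entry
  have hpre := hat.body.frame.pre
  have hf := hat.body.frame.rdi
  v_entry he
  obtain ⟨hsh, _, hpc, hpo, hapart⟩ := hpre
  obtain ⟨j_rip, hbody, j_rbp, _, hslr, hsllen, hr31, hslleft, hleft31, _, _⟩ := hat
  obtain ⟨hfrm, j_rbx, hsch, hsou⟩ := hbody
  obtain ⟨_, _, _, j_rsp, _, _, _, _, _, _, _, _, _, j_code, j_inv, hinv, hdi⟩ := hfrm
  -- where `*f` and the two out-objects are, as arithmetic facts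
  have hwf := stb_vorbis_get_frame_float.gff_obj_where hdi
  have hpcw := Vorbis.Spec.stb_vorbis_get_frame_float_5.seg5_out_where hsh (by decide) hpc
  have hpow := Vorbis.Spec.stb_vorbis_get_frame_float_5.seg5_out_where hsh (by decide) hpo
  have hobjLive := hdi.objLive
  simp only [Vorbis.Off.sizeof.stb_vorbis] at hobjLive
  have hr : u.reg .rdi = addr f := eq_addr _ _ hf
  have hfa : (addr f).toNat = f := toNat_addr f (by omega)
  -- 2. the present state's facts: `w_rip` under the walker's name, the others as rewrite rules `c_…`
  have w_rip := j_rip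
  have c_rsp : v.reg .rsp = u.reg .rsp - 184 := j_rsp
  have c_rbx : v.reg .rbx = addr f := by rw [j_rbx, hr]
  have c_rbp : v.reg .rbp = UInt64.ofNat ch := j_rbp
  have w_eq := Vorbis.conv_code_eqOn j_code
  have hdf : v.flags .df = false := (show X86.User.abiInv _ from j_inv).1
  have hmx : v.mxcsr &&& 0x1F80 = 0x1F80 := (show X86.User.abiInv _ from j_inv).2
  have hsse := Vorbis.sseOK_of_abiInv j_inv
  have w_kept : RegsKept [.rsp] v v := RegsKept.refl _ _
  clear hdi j_rbx j_rsp j_rbp hf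
  -- 3. the walk: 119806H … 119870H, `jmp 119769H`
  u_walk hcode [hμ.vendor] until [Vorbis.L.stb_vorbis_get_frame_float.at_119769] span [Vorbis.L.textLo, Vorbis.L.textHi] side (v_side)
  · -- check 119812H: `f->channel_buffer_start` (line 5069) is inside `*f`
    have hun : ShadowUntouched v.mem s_119812.mem := by v_untouched
    exact hobjLive.accSmall hinv hun _ 4 (by decide) (by u_omega) (by u_omega)
  · -- check 11982FH: `f->channel_buffer_end` (line 5070) is inside `*f`
    have hun : ShadowUntouched v.mem s_11982f.mem := by v_untouched
    exact hobjLive.accSmall hinv hun _ 4 (by decide) (by u_omega) (by u_omega)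
  · -- check 119864H, `channels = NULL`: `*output` (line 5073) is a live stack object of the callers
    have hun : ShadowUntouched v.mem s_119864.mem := by v_untouched
    have hobj := Vorbis.Spec.stb_vorbis_get_frame_float_5.seg5_out_live ((u.reg .rsp).toNat - 152) (hpo.resolve_left hbr_119858)
    exact hobj.accSmall hinv hun _ 8 (by decide) (Nat.le_refl _) (Nat.le_refl _)
  · -- check 119848H: `*channels` (line 5072) is a live stack object of the callers
    have hun : ShadowUntouched v.mem s_119848.mem := by v_untouched
    have hobj := Vorbis.Spec.stb_vorbis_get_frame_float_5.seg5_out_live ((u.reg .rsp).toNat - 152) (hpc.resolve_left hbr_119843)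
    exact hobj.accSmall hinv hun _ 4 (by decide) (Nat.le_refl _) (Nat.le_refl _)
  · -- check 119864H, `channels ≠ NULL`: `*output` (line 5073) is a live stack object of the callers
    have hun : ShadowUntouched v.mem s_119864.mem := by v_untouched
    have hobj := Vorbis.Spec.stb_vorbis_get_frame_float_5.seg5_out_live ((u.reg .rsp).toNat - 152) (hpo.resolve_left hbr_119858)
    exact hobj.accSmall hinv hun _ 8 (by decide) (Nat.le_refl _) (Nat.le_refl _)
  · -- 119769H, `channels = NULL`, `output = NULL`
    refine ReachVia.done ?_
    clear hpcw hpow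
    have hs : Mem.SameExcept [⟨(u.reg .rsp).toNat - 192, (u.reg .rsp).toNat - 184⟩, ⟨f + 1796, f + 1804⟩] v.mem
        s_119870.mem := by
      rw [w_mem]
      u_same
    have hun : ShadowUntouched v.mem s_119870.mem := by v_untouched
    refine Vorbis.Spec.stb_vorbis_get_frame_float_5.seg5_exit hat0 w_rip w_rsp (w_kept .r14 rfl) w_rbp
      (Vorbis.conv_code_in w_eq) ?_ hs ?_ hun ?_ ?_
    · v_inv
    · intro w hw
      simp only [List.mem_cons, List.not_mem_nil, or_false] at hw
      unfold Vorbis.Spec.stb_vorbis_get_frame_float_5.seg5_SpanOK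
      rcases hw with rfl | rfl
      · exact Or.inl ⟨Nat.le_refl _, Nat.le_refl _⟩
      · exact Or.inr (Or.inl ⟨Nat.le_refl _, Nat.le_refl _⟩)
    · intro hne
      exact absurd hbr_119843 hne
    · intro hne
      exact absurd hbr_119858 hne
  · -- 119769H, `channels = NULL`, `output ≠ NULL`
    refine ReachVia.done ?_
    obtain ⟨hw1, hw2⟩ := hpow.resolve_left hbr_119858
    clear hpcw hpow
    have hs : Mem.SameExcept [⟨(u.reg .rsp).toNat - 192, (u.reg .rsp).toNat - 184⟩, ⟨f + 1796, f + 1804⟩,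
        ⟨(u.reg .rdx).toNat, (u.reg .rdx).toNat + 8⟩] v.mem s_119870.mem := by
      rw [w_mem]
      u_same
    have hun : ShadowUntouched v.mem s_119870.mem := by v_untouched
    refine Vorbis.Spec.stb_vorbis_get_frame_float_5.seg5_exit hat0 w_rip w_rsp (w_kept .r14 rfl) w_rbp
      (Vorbis.conv_code_in w_eq) ?_ hs ?_ hun ?_ ?_
    · v_inv
    · intro w hw
      simp only [List.mem_cons, List.not_mem_nil, or_false] at hw
      unfold Vorbis.Spec.stb_vorbis_get_frame_float_5.seg5_SpanOK
      rcases hw with rfl | rfl | rfl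
      · exact Or.inl ⟨Nat.le_refl _, Nat.le_refl _⟩
      · exact Or.inr (Or.inl ⟨Nat.le_refl _, Nat.le_refl _⟩)
      · exact Or.inr (Or.inr (Or.inr ⟨hbr_119858, Nat.le_refl _, Nat.le_refl _⟩))
    · intro hne
      exact absurd hbr_119843 hne
    · intro _
      rw [w_mem]
      u_read
  · -- 119769H, `channels ≠ NULL`, `output = NULL`
    refine ReachVia.done ?_
    obtain ⟨hw1, hw2⟩ := hpcw.resolve_left hbr_119843
    clear hpcw hpow
    have hs : Mem.SameExcept [⟨(u.reg .rsp).toNat - 192, (u.reg .rsp).toNat - 184⟩, ⟨f + 1796, f + 1804⟩,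
        ⟨(u.reg .rsi).toNat, (u.reg .rsi).toNat + 4⟩] v.mem s_119870.mem := by
      rw [w_mem]
      u_same
    have hun : ShadowUntouched v.mem s_119870.mem := by v_untouched
    refine Vorbis.Spec.stb_vorbis_get_frame_float_5.seg5_exit hat0 w_rip w_rsp (w_kept .r14 rfl) w_rbp
      (Vorbis.conv_code_in w_eq) ?_ hs ?_ hun ?_ ?_
    · v_inv
    · intro w hw
      simp only [List.mem_cons, List.not_mem_nil, or_false] at hw
      unfold Vorbis.Spec.stb_vorbis_get_frame_float_5.seg5_SpanOK
      rcases hw with rfl | rfl | rfl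
      · exact Or.inl ⟨Nat.le_refl _, Nat.le_refl _⟩
      · exact Or.inr (Or.inl ⟨Nat.le_refl _, Nat.le_refl _⟩)
      · exact Or.inr (Or.inr (Or.inl ⟨hbr_119843, Nat.le_refl _, Nat.le_refl _⟩))
    · -- `*channels`, read back
      intro _
      rw [w_mem]
      exact Vorbis.Spec.stb_vorbis_get_frame_float_5.seg5_read_stored32 _ _ _
    · intro hne
      exact absurd hbr_119858 hne
  · -- 119769H, `channels ≠ NULL`, `output ≠ NULL`: the two objects are apart
    refine ReachVia.done ?_
    obtain ⟨hw1, hw2⟩ := hpcw.resolve_left hbr_119843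
    obtain ⟨hw3, hw4⟩ := hpow.resolve_left hbr_119858
    clear hpcw hpow
    have hs : Mem.SameExcept [⟨(u.reg .rsp).toNat - 192, (u.reg .rsp).toNat - 184⟩, ⟨f + 1796, f + 1804⟩,
        ⟨(u.reg .rsi).toNat, (u.reg .rsi).toNat + 4⟩, ⟨(u.reg .rdx).toNat, (u.reg .rdx).toNat + 8⟩] v.mem
        s_119870.mem := by
      rw [w_mem]
      u_same
    have hun : ShadowUntouched v.mem s_119870.mem := by v_untouched
    have hw5 : (u.reg .rsi).toNat + 4 ≤ (u.reg .rdx).toNat ∨ (u.reg .rdx).toNat + 8 ≤ (u.reg .rsi).toNat :=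
      (hapart.resolve_left hbr_119843).resolve_left hbr_119858
    refine Vorbis.Spec.stb_vorbis_get_frame_float_5.seg5_exit hat0 w_rip w_rsp (w_kept .r14 rfl) w_rbp
      (Vorbis.conv_code_in w_eq) ?_ hs ?_ hun ?_ ?_
    · v_inv
    · intro w hw
      simp only [List.mem_cons, List.not_mem_nil, or_false] at hw
      unfold Vorbis.Spec.stb_vorbis_get_frame_float_5.seg5_SpanOK
      rcases hw with rfl | rfl | rfl | rfl
      · exact Or.inl ⟨Nat.le_refl _, Nat.le_refl _⟩
      · exact Or.inr (Or.inl ⟨Nat.le_refl _, Nat.le_refl _⟩)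
      · exact Or.inr (Or.inr (Or.inl ⟨hbr_119843, Nat.le_refl _, Nat.le_refl _⟩))
      · exact Or.inr (Or.inr (Or.inr ⟨hbr_119858, Nat.le_refl _, Nat.le_refl _⟩))
    · -- `*channels`, read through the store into `*output`
      intro _
      rw [w_mem]
      exact Vorbis.Spec.stb_vorbis_get_frame_float_5.seg5_read_channels _ _ _ _ _ _ _ he_room hw1 hw2 hw4 hw5
    · intro _
      rw [w_mem]
      u_read
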